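-- pv_equiv track=rewrite | github.com/wboudy/CooperBench | src/cooperbench/eval/sandbox.py | _filter_test_files
-- ===== SOURCE A (Python) =====
-- def _filter_test_files(patch_content: str) -> str:
--     """Filter test files from patch content."""
--     if not patch_content:
--         return patch_content
--
--     filtered_lines = []
--     skip_until_next_diff = False
--
--     for line in patch_content.split("\n"):
--         # Check if this is a new file diff header
--         if line.startswith("diff --git"):
--             # Check if it's a test file
--             is_test_file = (
--                 "/test_" in line or "/tests/" in line or "_test.py" in line or "/test/" in line or "tests.py" in line
--             )
--             skip_until_next_diff = is_test_file
--
--         if not skip_until_next_diff: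
--             filtered_lines.append(line)
--
--     result = "\n".join(filtered_lines)
--     # Ensure patch ends with newline (required by git)
--     if result and not result.endswith("\n"):
--         result += "\n"
--     return result
-- ===== SOURCE B (Python) =====
-- def _filter_test_files(patch_content: str) -> str:
--     """Filter test files from patch content (group-then-filter decomposition)."""
--     lines = patch_content.split("\n")
--     # Group lines into blocks: a new block starts at each 'diff --git' header;
--     # the first block is the preamble (possibly empty).
--     blocks = []
--     cur = []
--     for line in lines:
--         if line.startswith("diff --git"):
--             blocks.append(cur)
--             cur = [line]
--         else:
--             cur.append(line)
--     blocks.append(cur)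
--     preamble, rest = blocks[0], blocks[1:]
--     kept = [
--         b for b in rest
--         if not ("/test_" in b[0] or "/tests/" in b[0] or "_test.py" in b[0]
--                 or "/test/" in b[0] or "tests.py" in b[0])
--     ]
--     result = "\n".join(preamble + [line for b in kept for line in b])
--     if result and not result.endswith("\n"):
--         result += "\n"
--     return result
-- ===== Notes on version B (the rewrite author's own statement) =====
-- stated objective: alternative
-- what changed: Replaces A's line-by-line loop with a stateful skip flag by an explicit group-then-filter structure: lines are first grouped into blocks at each 'diff --git' header, then whole non-test blocks (and the preamble) are kept and flattened.
import Mathlib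
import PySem

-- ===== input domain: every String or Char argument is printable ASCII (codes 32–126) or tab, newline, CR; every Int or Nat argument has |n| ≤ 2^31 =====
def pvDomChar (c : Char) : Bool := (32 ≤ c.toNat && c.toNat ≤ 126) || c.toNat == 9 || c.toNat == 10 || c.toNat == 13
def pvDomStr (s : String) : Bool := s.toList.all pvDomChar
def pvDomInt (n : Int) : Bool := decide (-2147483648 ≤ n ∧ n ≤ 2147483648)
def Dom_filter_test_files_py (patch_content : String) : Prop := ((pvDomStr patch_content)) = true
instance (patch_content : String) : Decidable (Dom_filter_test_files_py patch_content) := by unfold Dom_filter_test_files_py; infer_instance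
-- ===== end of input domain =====

-- B replaces A's stateful skip flag by an explicit group-then-filter decomposition; same cost.

-- shared substring criterion (the filtering spec both versions spell out verbatim)
def pvIsTest (line : String) : Bool :=
  PySem.Str.isIn "/test_" line || PySem.Str.isIn "/tests/" line ||
  PySem.Str.isIn "_test.py" line || PySem.Str.isIn "/test/" line ||
  PySem.Str.isIn "tests.py" line

def pvIsHeader (line : String) : Bool := PySem.Str.startswith line "diff --git"

-- ===== PORT A =====
-- loop body: state = (filtered_lines, skip_until_next_diff)
def pvAStep (st : List String × Bool) (line : String) : List String × Bool :=
  let skip := if pvIsHeader line then pvIsTest line else st.2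
  (if skip then st.1 else st.1 ++ [line], skip)

def filter_test_files_py (patch_content : String) : String :=
  if patch_content == "" then patch_content
  else
    let st := ((PySem.Str.split? patch_content "\n").getD []).foldl pvAStep ([], false)
    let result := PySem.Str.join "\n" st.1
    if result != "" && !(PySem.Str.endswith result "\n") then result ++ "\n" else result

-- ===== PORT B =====
-- loop body: state = (blocks, cur)
def pvBStep (st : List (List String) × List String) (line : String) :
    List (List String) × List String :=
  if pvIsHeader line then (st.1 ++ [st.2], [line]) else (st.1, st.2 ++ [line])

def filter_test_files_py_alt (patch_content : String) : String :=
  let lines := (PySem.Str.split? patch_content "\n").getD []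
  let st := lines.foldl pvBStep ([], [])
  let blocks := st.1 ++ [st.2]
  let preamble := blocks.headD []
  let rest := blocks.tail
  -- b[0]: every block in rest starts with its 'diff --git' header, hence is nonempty
  let kept := rest.filter (fun b => !pvIsTest (b.headD ""))
  let result := PySem.Str.join "\n" (preamble ++ kept.flatten)
  if result != "" && !(PySem.Str.endswith result "\n") then result ++ "\n" else result

-- ===== PRECONDITION & SPEC =====
def Spec_filter_test_files_py (patch_content : String) (out : String) : Prop := out = filter_test_files_py_alt patch_content
instance (patch_content : String) (out : String) : Decidable (Spec_filter_test_files_py patch_content out) := by unfold Spec_filter_test_files_py; infer_instance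

-- ===== CLAIM (what is proved, stated in full; the proofs are below) =====
def Claim_equal_filter_test_files_py : Prop := ∀ (patch_content : String), Dom_filter_test_files_py patch_content → Spec_filter_test_files_py patch_content (filter_test_files_py patch_content)

-- ===== LEMMAS AND PROOFS =====

-- F b lines: the lines A's loop keeps starting from skip-state b
def pvF (b : Bool) : List String → List String
  | [] => []
  | l :: ls =>
      if pvIsHeader l then
        (if pvIsTest l then pvF true ls else l :: pvF false ls)
      else
        (if b then pvF b ls else l :: pvF b ls)

theorem pvA_fold (lines : List String) : ∀ (acc : List String) (b : Bool),
    (lines.foldl pvAStep (acc, b)).1 = acc ++ pvF b lines := by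
  induction lines with
  | nil => intro acc b; simp [pvF]
  | cons l ls ih =>
      intro acc b
      simp only [List.foldl_cons, pvAStep, pvF]
      by_cases hh : pvIsHeader l = true
      · by_cases ht : pvIsTest l = true
        · simp [hh, ht, ih]
        · simp [hh, ht, ih]
      · by_cases hb : b = true
        · simp [hh, hb, ih]
        · simp [hh, hb, ih]

-- grouping recursion: (completed blocks, current partial block)
def pvGrp (cur : List String) : List String → List (List String) × List String
  | [] => ([], cur)
  | l :: ls =>
      if pvIsHeader l then
        let r := pvGrp [l] ls
        (cur :: r.1, r.2)
      else pvGrp (cur ++ [l]) ls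

theorem pvB_fold (lines : List String) : ∀ (blocks : List (List String)) (cur : List String),
    lines.foldl pvBStep (blocks, cur) =
      (blocks ++ (pvGrp cur lines).1, (pvGrp cur lines).2) := by
  induction lines with
  | nil => intro blocks cur; simp [pvGrp]
  | cons l ls ih =>
      intro blocks cur
      simp only [List.foldl_cons, pvBStep, pvGrp]
      by_cases hh : pvIsHeader l = true
      · simp [hh, ih]
      · simp [hh, ih]

def pvAllBlocks (cur : List String) (lines : List String) : List (List String) :=
  (pvGrp cur lines).1 ++ [(pvGrp cur lines).2]

def pvKeptFlat (bs : List (List String)) : List String :=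
  (bs.filter (fun b => !pvIsTest (b.head?.getD ""))).flatten

theorem pvQ (ls : List String) : ∀ (cur : List String), cur ≠ [] →
    pvKeptFlat (pvAllBlocks cur ls) =
      (if pvIsTest (cur.head?.getD "") then pvF true ls else cur ++ pvF false ls) := by
  induction ls with
  | nil =>
      intro cur hc
      by_cases ht : pvIsTest (cur.head?.getD "") = true
      · simp [pvAllBlocks, pvGrp, pvKeptFlat, pvF, ht]
      · simp [pvAllBlocks, pvGrp, pvKeptFlat, pvF, ht]
  | cons l ls ih =>
      intro cur hc
      by_cases hh : pvIsHeader l = true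
      · have hblocks : pvAllBlocks cur (l :: ls) = cur :: pvAllBlocks [l] ls := by
          simp [pvAllBlocks, pvGrp, hh]
        rw [hblocks]
        have hq := ih [l] (by simp)
        by_cases ht : pvIsTest (cur.head?.getD "") = true
        · by_cases htl : pvIsTest l = true <;>
            simp [pvKeptFlat, ht, htl, pvF, hh] at hq ⊢ <;> simp [hq]
        · by_cases htl : pvIsTest l = true <;>
            simp [pvKeptFlat, ht, htl, pvF, hh] at hq ⊢ <;> simp [hq]
      · have hblocks : pvAllBlocks cur (l :: ls) = pvAllBlocks (cur ++ [l]) ls := by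
          simp [pvAllBlocks, pvGrp, hh]
        have hhead : (cur ++ [l]).head?.getD "" = cur.head?.getD "" := by
          cases cur with
          | nil => exact absurd rfl hc
          | cons a as => simp
        rw [hblocks, ih (cur ++ [l]) (by simp), hhead]
        by_cases ht : pvIsTest (cur.head?.getD "") = true
        · simp [pvF, hh, ht]
        · simp [pvF, hh, ht]

theorem pvP (lines : List String) : ∀ (cur : List String),
    (pvAllBlocks cur lines).headD [] ++ pvKeptFlat ((pvAllBlocks cur lines).tail) =
      cur ++ pvF false lines := by
  induction lines with
  | nil => intro cur; simp [pvAllBlocks, pvGrp, pvKeptFlat, pvF]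
  | cons l ls ih =>
      intro cur
      by_cases hh : pvIsHeader l = true
      · have hblocks : pvAllBlocks cur (l :: ls) = cur :: pvAllBlocks [l] ls := by
          simp [pvAllBlocks, pvGrp, hh]
        rw [hblocks]
        have hq := pvQ ls [l] (by simp)
        simp only [List.headD_cons, List.tail_cons, hq]
        by_cases htl : pvIsTest l = true
        · simp [pvF, hh, htl]
        · simp [pvF, hh, htl]
      · have hblocks : pvAllBlocks cur (l :: ls) = pvAllBlocks (cur ++ [l]) ls := by
          simp [pvAllBlocks, pvGrp, hh]
        rw [hblocks, ih (cur ++ [l])]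
        simp [pvF, hh]

theorem pv_lines_eq (lines : List String) :
    ((lines.foldl pvAStep ([], false)).1 : List String) =
      (let st := lines.foldl pvBStep ([], []);
       let blocks := st.1 ++ [st.2];
       blocks.headD [] ++ ((blocks.tail).filter (fun b => !pvIsTest (b.headD ""))).flatten) := by
  rw [pvA_fold lines [] false, pvB_fold lines [] []]
  have h := pvP lines []
  simp only [List.headD_eq_head?_getD]
  simp only [pvAllBlocks, pvKeptFlat, List.headD_eq_head?_getD, List.nil_append] at h
  exact h.symm

-- ===== VERDICT (by name: the statement is the Claim_ definition above) =====
theorem filter_test_files_py_spec : Claim_equal_filter_test_files_py := by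
  intro patch_content _
  unfold Spec_filter_test_files_py filter_test_files_py filter_test_files_py_alt
  by_cases h : patch_content == ""
  · have h' : patch_content = "" := by simpa using h
    subst h'
    decide
  · rw [if_neg h]
    simp only [pv_lines_eq]
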